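-- pv_equiv track=rewrite | github.com/Zandereins/skillforge | skills/schliff/scripts/sync.py | _file_mentions_any
-- ===== SOURCE A (Python) =====
-- from typing import Dict, List, Tuple
--
-- def _file_mentions_any(file_dict: dict, terms: frozenset) -> List[dict]:
--     """Return directives whose normalized text contains any term."""
--     hits = []
--     for d in file_dict.get("directives", []):
--         text_lower = d["text"].lower()
--         for term in terms:
--             if term in text_lower:
--                 hits.append(d)
--                 break
--     return hits
-- ===== SOURCE B (Python) =====
-- def _file_mentions_any(file_dict, terms):
--     """Return directives whose normalized text contains any term.
--
--     Alternative strategy: instead of asking, per term, whether the term is a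
--     substring of the text, scan the lowered text once, left to right, and at
--     each position ask whether any term starts there (prefix check)."""
--     term_list = list(terms)
--
--     def mentions(text):
--         for i in range(len(text) + 1):
--             for t in term_list:
--                 if text.startswith(t, i):
--                     return True
--         return False
--
--     return [d for d in file_dict.get("directives", [])
--             if mentions(d["text"].lower())]
-- ===== Notes on version B (the rewrite author's own statement) =====
-- stated objective: alternative
-- what changed: B replaces A's per-term substring membership test with a single left-to-right position scan of each lowered text, checking at each position whether any term starts there, and builds the result as a filter instead of an append-with-break loop.
import Mathlib
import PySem

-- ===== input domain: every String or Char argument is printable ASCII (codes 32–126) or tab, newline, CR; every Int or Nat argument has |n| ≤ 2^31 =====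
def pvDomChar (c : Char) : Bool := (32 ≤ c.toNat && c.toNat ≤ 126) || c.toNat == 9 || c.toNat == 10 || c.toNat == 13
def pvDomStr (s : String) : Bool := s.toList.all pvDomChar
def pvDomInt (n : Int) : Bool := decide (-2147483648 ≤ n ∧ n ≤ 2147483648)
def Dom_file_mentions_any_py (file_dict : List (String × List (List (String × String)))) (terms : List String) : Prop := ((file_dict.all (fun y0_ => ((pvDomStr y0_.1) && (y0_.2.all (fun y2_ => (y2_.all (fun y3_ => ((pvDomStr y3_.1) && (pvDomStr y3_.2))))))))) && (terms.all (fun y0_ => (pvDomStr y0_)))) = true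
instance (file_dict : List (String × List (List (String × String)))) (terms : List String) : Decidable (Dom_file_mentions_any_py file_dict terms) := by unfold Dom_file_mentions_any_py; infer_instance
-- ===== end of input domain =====

-- B: same result by a different route — one left-to-right position scan per lowered text
-- (prefix check at each position) and a filter, instead of A's per-term substring test with append/break.
-- ===== PORT A =====
def file_mentions_any_py (file_dict : List (String × List (List (String × String)))) (terms : List String) : List (List (String × String)) :=
  ((PySem.Dict.mk file_dict).getD "directives" []).foldl
    (fun hits d =>
      let text_lower := PySem.Str.lower ((PySem.Dict.mk d).getD "text" "")
      if terms.any (fun term => PySem.Str.isIn term text_lower) then hits ++ [d] else hits)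
    []

-- ===== PORT B =====
-- Source B's `mentions(text)`: positions 0..len(text), at each position try every term as a prefix
def pvMentions (text : String) (term_list : List String) : Bool :=
  (List.range (text.toList.length + 1)).any
    (fun i => term_list.any (fun t => PySem.Chars.startswith (text.toList.drop i) t.toList))

def file_mentions_any_py_alt (file_dict : List (String × List (List (String × String)))) (terms : List String) : List (List (String × String)) :=
  ((PySem.Dict.mk file_dict).getD "directives" []).filter
    (fun d => pvMentions (PySem.Str.lower ((PySem.Dict.mk d).getD "text" "")) terms)

-- ===== PRECONDITION & SPEC =====
-- Pre_ excludes inputs where some directive lacks a "text" key: there Python A raises KeyError.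
def Pre_file_mentions_any_py (file_dict : List (String × List (List (String × String)))) (terms : List String) : Prop :=
  ∀ d ∈ (PySem.Dict.mk file_dict).getD "directives" [], "text" ∈ d.map Prod.fst
instance (file_dict : List (String × List (List (String × String)))) (terms : List String) : Decidable (Pre_file_mentions_any_py file_dict terms) := by unfold Pre_file_mentions_any_py; infer_instance
def pvWitness_file_mentions_any_py : (List (String × List (List (String × String)))) × List String :=
  ([("directives", [[("text", "Use AF-5 grit")], [("text", "polish")]])], ["af-5", "wax"])

def Spec_file_mentions_any_py (file_dict : List (String × List (List (String × String)))) (terms : List String) (out : List (List (String × String))) : Prop := out = file_mentions_any_py_alt file_dict terms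
instance (file_dict : List (String × List (List (String × String)))) (terms : List String) (out : List (List (String × String))) : Decidable (Spec_file_mentions_any_py file_dict terms out) := by unfold Spec_file_mentions_any_py; infer_instance

-- ===== CLAIM (what is proved, stated in full; the proofs are below) =====
def Claim_equal_file_mentions_any_py : Prop := ∀ (file_dict : List (String × List (List (String × String)))) (terms : List String), Dom_file_mentions_any_py file_dict terms → Pre_file_mentions_any_py file_dict terms → Spec_file_mentions_any_py file_dict terms (file_mentions_any_py file_dict terms)

-- ===== LEMMAS AND PROOFS =====

-- the heart of the equivalence: "some term is a substring of s" equals B's bounded position scan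
theorem any_isIn_eq_scan (terms : List String) (s : List Char) :
    (terms.any (fun t => PySem.Chars.isIn t.toList s)) =
    (List.range (s.length + 1)).any (fun i => terms.any (fun t => PySem.Chars.startswith (s.drop i) t.toList)) := by
  rw [Bool.eq_iff_iff]
  simp only [List.any_eq_true, List.mem_range, PySem.Chars.startswith_iff]
  constructor
  · rintro ⟨t, ht, hin⟩
    obtain ⟨j, hj⟩ := (PySem.Chars.exists_prefix_drop_iff_isIn t.toList s).mpr hin
    refine ⟨min j s.length, by omega, t, ht, ?_⟩
    by_cases h : j ≤ s.length
    · simpa [min_eq_left h] using hj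
    · have h1 : s.drop j = [] := List.drop_eq_nil_of_le (by omega)
      have h2 : s.drop (min j s.length) = [] := by
        rw [min_eq_right (by omega : s.length ≤ j)]; exact List.drop_length
      rw [h2, ← h1]; exact hj
  · rintro ⟨i, _, t, ht, hp⟩
    exact ⟨t, ht, (PySem.Chars.exists_prefix_drop_iff_isIn t.toList s).mp ⟨i, hp⟩⟩

-- ===== VERDICT (by name: the statement is the Claim_ definition above) =====
theorem file_mentions_any_py_spec : Claim_equal_file_mentions_any_py := by
  intro file_dict terms _ _
  unfold Spec_file_mentions_any_py
  simp only [file_mentions_any_py, file_mentions_any_py_alt]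
  refine Eq.trans
    (PySem.List.foldl_append_if
        (fun d => terms.any fun term =>
          PySem.Str.isIn term (PySem.Str.lower ((PySem.Dict.mk d).getD "text" ""))) id _ []) ?_
  rw [List.map_id, List.nil_append]
  refine List.filter_congr (fun d _ => ?_)
  simp only [pvMentions, PySem.Str.isIn_eq]
  exact any_isIn_eq_scan terms (PySem.Str.lower ((PySem.Dict.mk d).getD "text" "")).toList
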